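-- pv_equiv track=rewrite | github.com/mskozlova/advent_of_code | 2023/day14/day14_pt2.py | move_row_east
-- ===== SOURCE A (Python) =====
-- def move_row_east(map, row_num):
--     new_row = []
--     total_cols = len(map[0])
--     last_occupied_col = total_cols
--     load = 0
--
--     for col_num in range(total_cols - 1, -1, -1):
--         symbol = map[row_num][col_num]
--
--         if symbol == ".":
--             pass
--         elif symbol == "O":
--             last_occupied_col -= 1
--             load += total_cols - last_occupied_col
--             new_row.append("O")
--         else:  # symbol == "#"
--             while len(new_row) < total_cols - col_num - 1:
--                 new_row.append(".")
--
--             new_row.append("#")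
--             last_occupied_col = col_num
--
--     while len(new_row) < total_cols:
--         new_row.append(".")
--
--     new_row = new_row[::-1]
--
--     for col_num in range(total_cols):
--         map[row_num][col_num] = new_row[col_num]
--
--     return load
-- ===== SOURCE B (Python) =====
-- def move_row_east(map, row_num):
--     total_cols = len(map[0])
--     row = map[row_num]
--     load = 0
--     seg_len = 0
--     rocks = 0
--     new_chars = []
--     for j in range(total_cols):
--         ch = row[j]
--         if ch == "." or ch == "O":
--             seg_len += 1
--             if ch == "O":
--                 rocks += 1
--         else:
--             new_chars += ["."] * (seg_len - rocks) + ["O"] * rocks + ["#"]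
--             load += rocks * (total_cols - j) + rocks * (rocks + 1) // 2
--             seg_len = 0
--             rocks = 0
--     new_chars += ["."] * (seg_len - rocks) + ["O"] * rocks
--     load += rocks * (rocks + 1) // 2
--     for j in range(total_cols):
--         row[j] = new_chars[j]
--     return load
-- ===== Notes on version B (the rewrite author's own statement) =====
-- stated objective: alternative
-- what changed: A scans the row right-to-left tracking the last occupied column and adds the load rock by rock; B scans left-to-right, splitting the row into wall-separated segments and adding each segment's load in closed form (rocks*(total_cols-end) + rocks*(rocks+1)//2) at the wall.
-- outside the precondition, e.g. on move_row_east([[]], 1): A returns 0, B raises IndexError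
import Mathlib
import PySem

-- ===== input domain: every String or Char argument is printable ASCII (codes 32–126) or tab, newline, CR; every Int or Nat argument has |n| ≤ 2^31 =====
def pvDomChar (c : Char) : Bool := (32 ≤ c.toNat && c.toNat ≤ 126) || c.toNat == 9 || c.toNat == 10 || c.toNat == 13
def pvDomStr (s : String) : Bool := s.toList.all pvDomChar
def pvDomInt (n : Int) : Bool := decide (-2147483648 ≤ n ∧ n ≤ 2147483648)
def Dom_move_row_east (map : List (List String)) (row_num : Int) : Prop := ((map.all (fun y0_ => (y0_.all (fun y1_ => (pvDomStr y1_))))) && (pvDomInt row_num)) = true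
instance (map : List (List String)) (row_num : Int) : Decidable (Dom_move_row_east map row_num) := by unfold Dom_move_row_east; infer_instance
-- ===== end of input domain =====

-- B computes the load segment-by-segment (left-to-right, closed form per wall-separated segment)
-- instead of A's right-to-left rock-by-rock accumulation; both Pythons mutate map[row_num] in
-- place identically, and the equivalence proved here is about the RETURN value (the load) only.

-- ===== PORT A =====
-- A's trailing padding, reversal and write-back only mutate map and cannot change the returned
-- load, so the port returns the load accumulator of the main loop.
def move_row_east (map : List (List String)) (row_num : Int) : Int :=
  match PySem.List.pyGet? map 0 with
  | none => 0
  | some row0 =>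
    let total_cols : Int := row0.length
    let row : List String := (PySem.List.pyGet? map row_num).getD []
    let st := (PySem.List.pyRange (total_cols - 1) (-1) (-1)).foldl
      (fun (s : List String × Int × Int) col_num =>
        let symbol := PySem.List.pyGetD row col_num ""
        if symbol = "." then s
        else if symbol = "O" then
          (s.1 ++ ["O"], s.2.1 - 1, s.2.2 + (total_cols - (s.2.1 - 1)))
        else
          (s.1 ++ List.replicate ((total_cols - col_num - 1) - (s.1.length : Int)).toNat "." ++ ["#"],
           col_num, s.2.2))
      ([], total_cols, 0)
    st.2.2

-- ===== PORT B =====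
-- state (load, seg_len, rocks); new_chars and the write-back only mutate map and are not modelled.
def move_row_east_alt (map : List (List String)) (row_num : Int) : Int :=
  match PySem.List.pyGet? map 0, PySem.List.pyGet? map row_num with
  | some row0, some row =>
    let total_cols : Int := row0.length
    let st := (PySem.List.pyRange 0 total_cols 1).foldl
      (fun (s : Int × Int × Int) j =>
        let ch := PySem.List.pyGetD row j ""
        if ch = "." ∨ ch = "O" then
          (s.1, s.2.1 + 1, if ch = "O" then s.2.2 + 1 else s.2.2)
        else
          (s.1 + s.2.2 * (total_cols - j) + PySem.Int.floordiv (s.2.2 * (s.2.2 + 1)) 2, 0, 0))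
      (0, 0, 0)
    st.1 + PySem.Int.floordiv (st.2.2 * (st.2.2 + 1)) 2
  | _, _ => 0

-- ===== PRECONDITION & SPEC =====
-- Pre_ excludes the inputs where A raises IndexError (empty map; row_num out of range while the
-- first row is non-empty; selected row shorter than the first row) and the one corner where the
-- first row is empty and row_num is out of range: there A's loops never touch map[row_num] and A
-- returns 0, while B fetches the row upfront and raises IndexError.
def Pre_move_row_east (map : List (List String)) (row_num : Int) : Prop :=
  map ≠ [] ∧ PySem.Raise.InRange map.length row_num ∧
    (map.headD []).length ≤ ((PySem.List.pyGet? map row_num).getD []).length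
instance (map : List (List String)) (row_num : Int) : Decidable (Pre_move_row_east map row_num) := by
  unfold Pre_move_row_east; infer_instance

def pvWitness_move_row_east : List (List String) × Int := ([["O", ".", "#", ".", "O", "O"]], 0)

def Spec_move_row_east (map : List (List String)) (row_num : Int) (out : Int) : Prop := out = move_row_east_alt map row_num
instance (map : List (List String)) (row_num : Int) (out : Int) : Decidable (Spec_move_row_east map row_num out) := by unfold Spec_move_row_east; infer_instance

-- ===== CLAIM (what is proved, stated in full; the proofs are below) =====
def Claim_equal_move_row_east : Prop := ∀ (map : List (List String)) (row_num : Int), Dom_move_row_east map row_num → Pre_move_row_east map row_num → Spec_move_row_east map row_num (move_row_east map row_num)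

-- ===== LEMMAS AND PROOFS =====

def gA (T : Int) (row : List String) (s : Int × Int) (col : Int) : Int × Int :=
  if PySem.List.pyGetD row col "" = "." then s
  else if PySem.List.pyGetD row col "" = "O" then (s.1 - 1, s.2 + (T - (s.1 - 1)))
  else (col, s.2)

def hB (T : Int) (row : List String) (s : Int × Int) (j : Int) : Int × Int :=
  if PySem.List.pyGetD row j "" = "." ∨ PySem.List.pyGetD row j "" = "O" then
    (s.1, if PySem.List.pyGetD row j "" = "O" then s.2 + 1 else s.2)
  else (s.1 + s.2 * (T - j) + PySem.Int.floordiv (s.2 * (s.2 + 1)) 2, 0)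

theorem foldA_proj (T : Int) (row : List String) (l : List Int) :
    ∀ (s : List String × Int × Int),
      (l.foldl
        (fun (s : List String × Int × Int) col_num =>
          if PySem.List.pyGetD row col_num "" = "." then s
          else if PySem.List.pyGetD row col_num "" = "O" then
            (s.1 ++ ["O"], s.2.1 - 1, s.2.2 + (T - (s.2.1 - 1)))
          else
            (s.1 ++ List.replicate ((T - col_num - 1) - (s.1.length : Int)).toNat "." ++ ["#"],
             col_num, s.2.2)) s).2
      = l.foldl (gA T row) s.2 := by
  induction l with
  | nil => intro s; rfl
  | cons x xs ih =>
    intro s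
    simp only [List.foldl_cons]
    rw [ih]
    congr 1
    simp only [gA]
    split_ifs <;> rfl

theorem foldB_proj (T : Int) (row : List String) (l : List Int) :
    ∀ (s : Int × Int × Int),
      (((l.foldl
        (fun (s : Int × Int × Int) j =>
          if PySem.List.pyGetD row j "" = "." ∨ PySem.List.pyGetD row j "" = "O" then
            (s.1, s.2.1 + 1, if PySem.List.pyGetD row j "" = "O" then s.2.2 + 1 else s.2.2)
          else
            (s.1 + s.2.2 * (T - j) + PySem.Int.floordiv (s.2.2 * (s.2.2 + 1)) 2, 0, 0)) s).1,
       (l.foldl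
        (fun (s : Int × Int × Int) j =>
          if PySem.List.pyGetD row j "" = "." ∨ PySem.List.pyGetD row j "" = "O" then
            (s.1, s.2.1 + 1, if PySem.List.pyGetD row j "" = "O" then s.2.2 + 1 else s.2.2)
          else
            (s.1 + s.2.2 * (T - j) + PySem.Int.floordiv (s.2.2 * (s.2.2 + 1)) 2, 0, 0)) s).2.2)
        : Int × Int)
      = l.foldl (hB T row) (s.1, s.2.2) := by
  induction l with
  | nil => intro s; rfl
  | cons x xs ih =>
    intro s
    simp only [List.foldl_cons]
    rw [ih]
    congr 1
    simp only [hB]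
    split_ifs <;> rfl

def aRun (T : Int) (row : List String) : Int → Nat → Int → Int × Int
  | _, 0, last => (last, 0)
  | j, k + 1, last =>
    if PySem.List.pyGetD row j "" = "." then aRun T row (j + 1) k last
    else if PySem.List.pyGetD row j "" = "O" then
      ((aRun T row (j + 1) k last).1 - 1,
       (aRun T row (j + 1) k last).2 + (T - ((aRun T row (j + 1) k last).1 - 1)))
    else (j, (aRun T row (j + 1) k last).2)

def bRun (T : Int) (row : List String) : Int → Nat → Int → Int → Int
  | _, 0, rocks, load => load + PySem.Int.floordiv (rocks * (rocks + 1)) 2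
  | j, k + 1, rocks, load =>
    if PySem.List.pyGetD row j "" = "." ∨ PySem.List.pyGetD row j "" = "O" then
      bRun T row (j + 1) k (if PySem.List.pyGetD row j "" = "O" then rocks + 1 else rocks) load
    else bRun T row (j + 1) k 0 (load + rocks * (T - j) + PySem.Int.floordiv (rocks * (rocks + 1)) 2)

theorem tri_succ (r : Int) :
    PySem.Int.floordiv ((r + 1) * (r + 1 + 1)) 2 = PySem.Int.floordiv (r * (r + 1)) 2 + (r + 1) := by
  rw [PySem.Int.floordiv_eq_ediv_of_pos (by omega), PySem.Int.floordiv_eq_ediv_of_pos (by omega)]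
  have h : (r + 1) * (r + 1 + 1) = r * (r + 1) + (r + 1) * 2 := by ring
  rw [h, Int.add_mul_ediv_right _ _ (by omega)]

theorem foldA_eq_aRun (T : Int) (row : List String) :
    ∀ (k : Nat) (j last load : Int),
      (PySem.List.pyRange j (j + (k : Int)) 1).foldr (fun x s => gA T row s x) (last, load)
        = ((aRun T row j k last).1, load + (aRun T row j k last).2) := by
  intro k
  induction k with
  | zero =>
    intro j last load
    rw [PySem.List.pyRange_one_eq_nil (by omega)]
    simp [aRun]
  | succ k ih =>
    intro j last load
    rw [PySem.List.pyRange_one_cons (a := j) (b := j + ((k : Nat) + 1 : Nat)) (by push_cast; omega)]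
    have hrange : PySem.List.pyRange (j + 1) (j + ((k : Nat) + 1 : Nat)) 1
        = PySem.List.pyRange (j + 1) ((j + 1) + (k : Int)) 1 := by push_cast; ring_nf
    simp only [List.foldr_cons]
    rw [hrange, ih (j + 1) last load]
    by_cases hd : PySem.List.pyGetD row j "" = "."
    · simp [aRun, gA, hd]
    · by_cases ho : PySem.List.pyGetD row j "" = "O"
      · simp [aRun, gA, ho]; ring
      · simp [aRun, gA, hd, ho]

theorem foldB_eq_bRun (T : Int) (row : List String) :
    ∀ (k : Nat) (j rocks load : Int),
      ((PySem.List.pyRange j (j + (k : Int)) 1).foldl (hB T row) (load, rocks)).1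
        + PySem.Int.floordiv
            (((PySem.List.pyRange j (j + (k : Int)) 1).foldl (hB T row) (load, rocks)).2
              * (((PySem.List.pyRange j (j + (k : Int)) 1).foldl (hB T row) (load, rocks)).2 + 1)) 2
        = bRun T row j k rocks load := by
  intro k
  induction k with
  | zero =>
    intro j rocks load
    rw [PySem.List.pyRange_one_eq_nil (by omega)]
    simp [bRun]
  | succ k ih =>
    intro j rocks load
    rw [PySem.List.pyRange_one_cons (a := j) (b := j + ((k : Nat) + 1 : Nat)) (by push_cast; omega)]
    have hrange : PySem.List.pyRange (j + 1) (j + ((k : Nat) + 1 : Nat)) 1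
        = PySem.List.pyRange (j + 1) ((j + 1) + (k : Int)) 1 := by push_cast; ring_nf
    simp only [List.foldl_cons, hrange]
    by_cases hd : PySem.List.pyGetD row j "" = "."
    · simp only [bRun, hB, hd]
      simp only [String.reduceEq, if_false]
      exact ih (j + 1) rocks load
    · by_cases ho : PySem.List.pyGetD row j "" = "O"
      · simp only [bRun, hB, ho]
        simp only [String.reduceEq, false_or, if_true]
        exact ih (j + 1) (rocks + 1) load
      · simp only [bRun, hB]
        rw [if_neg (by tauto), if_neg (by tauto)]
        exact ih (j + 1) 0 _

theorem main_rel (T : Int) (row : List String) :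
    ∀ (k : Nat) (j rocks load : Int),
      bRun T row j k rocks load
        = load + (aRun T row j k T).2 + rocks * (T - (aRun T row j k T).1)
            + PySem.Int.floordiv (rocks * (rocks + 1)) 2 := by
  intro k
  induction k with
  | zero => intro j rocks load; simp [bRun, aRun]
  | succ k ih =>
    intro j rocks load
    by_cases hd : PySem.List.pyGetD row j "" = "."
    · simp only [bRun, aRun, hd]
      simp only [String.reduceEq, if_true, if_false]
      exact ih (j + 1) rocks load
    · by_cases ho : PySem.List.pyGetD row j "" = "O"
      · simp only [bRun, aRun, ho]
        simp only [String.reduceEq, false_or, if_true, if_false]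
        rw [ih (j + 1) (rocks + 1) load, tri_succ]
        ring
      · simp only [bRun, aRun]
        rw [if_neg (by tauto), if_neg hd, if_neg ho]
        rw [ih (j + 1) 0 (load + rocks * (T - j) + PySem.Int.floordiv (rocks * (rocks + 1)) 2)]
        have ht0 : PySem.Int.floordiv ((0 : Int) * (0 + 1)) 2 = 0 := by decide
        rw [ht0]
        ring


-- ===== VERDICT (by name: the statement is the Claim_ definition above) =====
theorem move_row_east_spec : Claim_equal_move_row_east := by
  intro map row_num _hdom hpre
  unfold Spec_move_row_east
  obtain ⟨hne, hin, _hlen⟩ := hpre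
  obtain ⟨row0, maptl, rfl⟩ : ∃ r t, map = r :: t := by
    cases map with
    | nil => exact absurd rfl hne
    | cons a b => exact ⟨a, b, rfl⟩
  have h0 : PySem.List.pyGet? (row0 :: maptl) 0 = some row0 :=
    PySem.List.pyGet?_zero_cons row0 maptl
  obtain ⟨row, hrow⟩ : ∃ r, PySem.List.pyGet? (row0 :: maptl) row_num = some r := by
    rcases h : PySem.List.pyGet? (row0 :: maptl) row_num with _ | r
    · exact absurd hin (by rwa [← PySem.List.pyGet?_eq_none_iff])
    · exact ⟨r, rfl⟩
  simp only [move_row_east, move_row_east_alt, h0, hrow, Option.getD_some]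
  set T : Int := ((row0.length : Nat) : Int) with hT
  have hfa := foldA_proj T row (PySem.List.pyRange (T - 1) (-1) (-1)) ([], T, 0)
  rw [hfa]
  have hAr : PySem.List.pyRange (T - 1) (-1) (-1) = (PySem.List.pyRange 0 (0 + T) 1).reverse := by
    rw [PySem.List.pyRange_neg_one_eq_reverse]
    norm_num
  rw [hAr, List.foldl_reverse]
  have hA := foldA_eq_aRun T row row0.length 0 T 0
  rw [hA]
  have hp := foldB_proj T row (PySem.List.pyRange 0 T 1) (0, 0, 0)
  have hp1 := congrArg Prod.fst hp
  have hp2 := congrArg Prod.snd hp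
  simp only at hp1 hp2
  rw [hp1, hp2]
  have hB' := foldB_eq_bRun T row row0.length 0 0 0
  rw [zero_add] at hB'
  rw [hB']
  rw [main_rel]
  have ht0 : PySem.Int.floordiv ((0 : Int) * (0 + 1)) 2 = 0 := by decide
  rw [ht0]
  ring
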